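-- pv_equiv track=rewrite | github.com/james-mcshinsky/LanguageLearning | src/language_learning/ai_blurbs.py | _generate_simple
-- ===== SOURCE A (Python) =====
-- from typing import Iterable, List, Optional
--
-- def _generate_simple(
--     known_words: Iterable[str],
--     l_plus_one_words: Iterable[str],
--     length: int,
-- ) -> str:
--     """Deterministic template-based blurb generator."""
--
--     allowed = list(dict.fromkeys(list(l_plus_one_words) + list(known_words)))
--     if length <= 0 or not allowed:
--         return ""
--
--     words: List[str] = []
--     idx = 0
--     while len(words) < length:
--         words.append(allowed[idx % len(allowed)])
--         idx += 1
--
--     return " ".join(words)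
-- ===== SOURCE B (Python) =====
-- def _generate_simple(known_words, l_plus_one_words, length):
--     allowed = list(dict.fromkeys(list(l_plus_one_words) + list(known_words)))
--     if length <= 0 or not allowed:
--         return ""
--     q, r = divmod(length, len(allowed))
--     return " ".join(allowed * q + allowed[:r])
-- ===== Notes on version B (the rewrite author's own statement) =====
-- stated objective: idiomatic
-- what changed: Replaced the index-by-index while loop with a modulo counter by a closed-form divmod: the blurb is materialized as q full copies of the allowed list plus a slice of the remainder, then joined.
import Mathlib
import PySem

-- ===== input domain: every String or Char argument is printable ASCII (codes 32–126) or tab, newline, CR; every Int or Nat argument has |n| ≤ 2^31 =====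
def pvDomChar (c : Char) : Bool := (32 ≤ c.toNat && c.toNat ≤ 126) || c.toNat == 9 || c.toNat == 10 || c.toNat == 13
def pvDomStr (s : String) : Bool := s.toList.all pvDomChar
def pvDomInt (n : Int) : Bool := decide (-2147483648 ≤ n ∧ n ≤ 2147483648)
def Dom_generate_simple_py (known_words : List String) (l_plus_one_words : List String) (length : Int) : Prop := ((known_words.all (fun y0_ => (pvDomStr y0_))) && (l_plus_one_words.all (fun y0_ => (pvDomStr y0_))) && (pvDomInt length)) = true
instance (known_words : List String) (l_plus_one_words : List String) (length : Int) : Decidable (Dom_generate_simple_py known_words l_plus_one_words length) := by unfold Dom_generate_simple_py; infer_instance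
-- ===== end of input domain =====

-- B replaces A's index-by-index while loop by a closed-form divmod with list
-- repetition and a slice (idiomatic decomposition; same output, return value only).

-- ===== PORT A =====
-- the while loop: append allowed[idx % len(allowed)] until len(words) == length
def pyLoopA (allowed : List String) (length : Int) (words : List String) (idx : Nat) : List String :=
  if (words.length : Int) < length then
    -- allowed[idx % len(allowed)]: idx % len(allowed) is always in range (allowed ≠ [] here),
    -- so getD is exact
    pyLoopA allowed length (words ++ [allowed.getD (idx % allowed.length) ""]) (idx + 1)
  else words
termination_by (length - words.length).toNat
decreasing_by simp_all; omega

def generate_simple_py (known_words : List String) (l_plus_one_words : List String) (length : Int) : String :=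
  let allowed := PySem.List.dedup (l_plus_one_words ++ known_words)
  if length ≤ 0 ∨ allowed = [] then ""
  else PySem.Str.join " " (pyLoopA allowed length [] 0)

-- ===== PORT B =====
def generate_simple_py_alt (known_words : List String) (l_plus_one_words : List String) (length : Int) : String :=
  let allowed := PySem.List.dedup (l_plus_one_words ++ known_words)
  if length ≤ 0 ∨ allowed = [] then ""
  else
    let q := PySem.Int.floordiv length allowed.length
    let r := PySem.Int.mod length allowed.length
    -- allowed * q  →  flatten of q copies;  allowed[:r] with 0 ≤ r < len  →  take r (exact here)
    PySem.Str.join " " ((List.replicate q.toNat allowed).flatten ++ allowed.take r.toNat)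

-- ===== PRECONDITION & SPEC =====
def Spec_generate_simple_py (known_words : List String) (l_plus_one_words : List String) (length : Int) (out : String) : Prop := out = generate_simple_py_alt known_words l_plus_one_words length
instance (known_words : List String) (l_plus_one_words : List String) (length : Int) (out : String) : Decidable (Spec_generate_simple_py known_words l_plus_one_words length out) := by unfold Spec_generate_simple_py; infer_instance

-- ===== CLAIM (what is proved, stated in full; the proofs are below) =====
def Claim_equal_generate_simple_py : Prop := ∀ (known_words : List String) (l_plus_one_words : List String) (length : Int), Dom_generate_simple_py known_words l_plus_one_words length → Spec_generate_simple_py known_words l_plus_one_words length (generate_simple_py known_words l_plus_one_words length)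

-- ===== LEMMAS AND PROOFS =====

-- A's loop produces the cyclic word list, element j being allowed[(idx+j) % len]
theorem pyLoopA_eq (allowed : List String) (length : Int) :
    ∀ (k : Nat) (words : List String) (idx : Nat), (length : Int) = words.length + k →
    pyLoopA allowed length words idx
      = words ++ (List.range k).map (fun j => allowed.getD ((idx + j) % allowed.length) "") := by
  intro k
  induction k with
  | zero =>
    intro words idx h
    rw [pyLoopA]
    simp [show ¬ ((words.length : Int) < length) by omega]
  | succ k ih =>
    intro words idx h
    rw [pyLoopA]
    rw [if_pos (by omega)]
    rw [ih (words ++ [allowed.getD (idx % allowed.length) ""]) (idx + 1) (by simp; omega)]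
    simp [List.range_succ_eq_map, List.map_map, Function.comp_def]
    intro a _
    have : idx + 1 + a = idx + (a + 1) := by omega
    rw [this]

-- the first m cyclic elements are allowed itself (r ≤ m case uses take)
theorem take_eq_range_map (allowed : List String) (r : Nat) (hr : r ≤ allowed.length) :
    allowed.take r
      = (List.range r).map (fun j => allowed.getD (j % allowed.length) "") := by
  apply List.ext_getElem
  · simp; omega
  · intro i h1 h2
    simp at h1 h2 ⊢
    rw [Nat.mod_eq_of_lt (by omega), List.getElem?_eq_getElem (by omega)]
    rfl

-- closed form: q full copies plus a prefix of r equals the first q*m + r cyclic elements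
theorem repfl_eq_range_map (allowed : List String) (r : Nat)
    (hr : r ≤ allowed.length) :
    ∀ q : Nat, (List.replicate q allowed).flatten ++ allowed.take r
      = (List.range (q * allowed.length + r)).map
          (fun j => allowed.getD (j % allowed.length) "") := by
  intro q
  induction q with
  | zero => simpa using take_eq_range_map allowed r hr
  | succ q ih =>
    have hsplit : (q + 1) * allowed.length + r
        = allowed.length + (q * allowed.length + r) := by ring
    rw [hsplit, List.range_add, List.map_append, List.map_map]
    have h1 : (List.range allowed.length).map
        (fun j => allowed.getD (j % allowed.length) "") = allowed := by
      apply List.ext_getElem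
      · simp
      · intro i h1 h2
        simp at h1 ⊢
        rw [Nat.mod_eq_of_lt h1, List.getElem?_eq_getElem h1]
        rfl
    have h2 : ((List.range (q * allowed.length + r)).map
          ((fun j => allowed.getD (j % allowed.length) "") ∘ (allowed.length + ·)))
        = (List.range (q * allowed.length + r)).map
          (fun j => allowed.getD (j % allowed.length) "") := by
      apply List.map_congr_left
      intro j _
      simp [Function.comp, Nat.add_mod_left]
    rw [h1, h2, ← ih]
    simp [List.replicate_succ]

-- ===== VERDICT (by name: the statement is the Claim_ definition above) =====
theorem generate_simple_py_spec : Claim_equal_generate_simple_py := by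
  intro known_words l_plus_one_words length _
  unfold Spec_generate_simple_py generate_simple_py generate_simple_py_alt
  set allowed := PySem.List.dedup (l_plus_one_words ++ known_words) with hA
  by_cases hguard : length ≤ 0 ∨ allowed = []
  · simp [hguard]
  · rw [if_neg hguard, if_neg hguard]
    push Not at hguard
    obtain ⟨hpos, hne⟩ := hguard
    have hm : 0 < allowed.length := List.length_pos_of_ne_nil hne
    have hlen : length = (length.toNat : Int) := by omega
    congr 1
    set n := length.toNat with hn
    have hq : (PySem.Int.floordiv length (allowed.length : Int)).toNat = n / allowed.length := by
      rw [hlen, PySem.Int.floordiv_natCast]; norm_cast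
    have hr : (PySem.Int.mod length (allowed.length : Int)).toNat = n % allowed.length := by
      rw [hlen, PySem.Int.mod_natCast]; norm_cast
    rw [hq, hr]
    rw [pyLoopA_eq allowed length n [] 0 (by simp [hn]; omega)]
    rw [repfl_eq_range_map allowed (n % allowed.length)
        (Nat.le_of_lt (Nat.mod_lt _ hm)) (n / allowed.length)]
    have hnm : n / allowed.length * allowed.length + n % allowed.length = n := by
      calc n / allowed.length * allowed.length + n % allowed.length
          = allowed.length * (n / allowed.length) + n % allowed.length := by ring
        _ = n := Nat.div_add_mod n allowed.length
    rw [hnm]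
    simp
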